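-- pv_equiv track=rewrite | github.com/JingxinLee/Leetcode | 0_Leetcode/830.较大分组的位置.py | largeGroupPositions0
-- ===== SOURCE A (Python) =====
-- from typing import List
--
-- def largeGroupPositions0(s: str) -> List[List[int]]:
--     """
--     :type s: str
--     :rtype: List[List[int]]
--     """
--     n = len(s)
--     res = []
--     i = 0
--     while i < n:
--         j = i
--         while j < n and s[j] == s[i]:
--             j += 1
--         if j - i >= 3:
--             res.append([i,j-1])
--         i = j
--     return res
-- ===== SOURCE B (Python) =====
-- from typing import List
--
-- def largeGroupPositions0(s: str) -> List[List[int]]: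
--     # Staged passes: first compute the list of run boundaries (positions where
--     # adjacent characters differ), then pair consecutive boundaries and keep
--     # the gaps of size >= 3.
--     breaks = [0] + [i + 1 for i, (a, b) in enumerate(zip(s, s[1:])) if a != b] + [len(s)]
--     return [[a, b - 1] for a, b in zip(breaks, breaks[1:]) if b - a >= 3]
-- ===== Notes on version B (the rewrite author's own statement) =====
-- stated objective: alternative
-- what changed: Replaces the nested index/while run-scan with two staged comprehensions: first build the list of run boundaries (positions where adjacent characters differ, plus 0 and len(s)), then zip consecutive boundaries and keep gaps of size >= 3.
import Mathlib
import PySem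

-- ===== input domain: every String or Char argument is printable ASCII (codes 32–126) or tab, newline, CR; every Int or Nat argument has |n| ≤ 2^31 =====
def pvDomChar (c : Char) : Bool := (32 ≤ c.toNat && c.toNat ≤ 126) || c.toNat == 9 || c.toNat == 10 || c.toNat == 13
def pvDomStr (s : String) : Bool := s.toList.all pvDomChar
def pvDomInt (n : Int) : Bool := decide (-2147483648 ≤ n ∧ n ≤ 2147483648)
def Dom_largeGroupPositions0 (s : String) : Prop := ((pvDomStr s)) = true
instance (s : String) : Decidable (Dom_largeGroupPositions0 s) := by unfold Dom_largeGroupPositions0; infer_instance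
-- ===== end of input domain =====

-- B replaces A's nested while run-scan with two staged passes: a boundary list (adjacent-differ positions plus 0 and n), then pairing consecutive boundaries and keeping gaps ≥ 3; same O(n) cost.


-- ===== PORT A =====
-- A's outer while walks index i; the inner while 'while j < n and s[j] == s[i]: j += 1'
-- advances j past the run of s[i]: on the suffix c :: rest it counts the leading chars of
-- rest equal to c (takeWhile length) — an exact step-for-step rendering of the inner scan.
def lgpLoopA (l : List Char) (i : Int) : List (List Int) :=
  match l with
  | [] => []
  | c :: rest =>
    let k := (rest.takeWhile (· == c)).length   -- inner while: j ends at i + 1 + k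
    let j := i + 1 + k
    let tail := lgpLoopA (rest.drop k) j
    if j - i ≥ 3 then [i, j - 1] :: tail else tail
termination_by l.length
decreasing_by simp [List.length_drop]

def largeGroupPositions0 (s : String) : List (List Int) := lgpLoopA s.toList 0

-- ===== PORT B =====
-- first comprehension: '[i + 1 for i, (a, b) in enumerate(zip(s, s[1:])) if a != b]'
-- — the enumerate(zip(s, s[1:])) loop transcribed as a recursion over adjacent pairs
-- carrying the index counter st.
def lgpPairs (st : Int) (l : List Char) : List Int :=
  match l with
  | a :: b :: t => (if a = b then [] else [st + 1]) ++ lgpPairs (st + 1) (b :: t)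
  | _ => []

-- second comprehension: '[[a, b - 1] for a, b in zip(breaks, breaks[1:]) if b - a >= 3]'
def lgpOut (bs : List Int) : List (List Int) :=
  ((bs.zip bs.tail).filter (fun p => decide (p.2 - p.1 ≥ 3))).map (fun p => [p.1, p.2 - 1])

def largeGroupPositions0_alt (s : String) : List (List Int) :=
  lgpOut (0 :: lgpPairs 0 s.toList ++ [(s.toList.length : Int)])

-- ===== PRECONDITION & SPEC =====
def Spec_largeGroupPositions0 (s : String) (out : List (List Int)) : Prop := out = largeGroupPositions0_alt s
instance (s : String) (out : List (List Int)) : Decidable (Spec_largeGroupPositions0 s out) := by unfold Spec_largeGroupPositions0; infer_instance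

-- ===== CLAIM (what is proved, stated in full; the proofs are below) =====
def Claim_equal_largeGroupPositions0 : Prop := ∀ (s : String), Dom_largeGroupPositions0 s → Spec_largeGroupPositions0 s (largeGroupPositions0 s)

-- ===== LEMMAS AND PROOFS =====

-- the boundary list of a suffix starting at absolute position p
def lgpBsFrom (p : Int) (l : List Char) : List Int := p :: lgpPairs p l ++ [p + l.length]

theorem lgpOut_cons (a b : Int) (t : List Int) :
    lgpOut (a :: b :: t) = (if b - a ≥ 3 then [[a, b - 1]] else []) ++ lgpOut (b :: t) := by
  simp only [lgpOut, List.tail_cons, List.zip_cons_cons, List.filter_cons]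
  by_cases h : b - a ≥ 3 <;> simp [h]

-- how the first comprehension decomposes at the first run
theorem lgpPairs_run (rest : List Char) : ∀ (p : Int) (c : Char),
    lgpPairs p (c :: rest) =
      (if rest.drop (rest.takeWhile (· == c)).length = [] then []
       else [p + 1 + (rest.takeWhile (· == c)).length]) ++
      lgpPairs (p + 1 + (rest.takeWhile (· == c)).length)
        (rest.drop (rest.takeWhile (· == c)).length) := by
  induction rest with
  | nil => intro p c; simp [lgpPairs]
  | cons d t ih =>
    intro p c
    by_cases hdc : d = c
    · subst hdc
      have hlhs : lgpPairs p (d :: d :: t) = lgpPairs (p + 1) (d :: t) := by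
        simp [lgpPairs]
      rw [hlhs, ih (p + 1) d]
      have htw : ((d :: t).takeWhile (· == d)).length = (t.takeWhile (· == d)).length + 1 := by
        simp
      rw [htw]
      have hdrop : (d :: t).drop ((t.takeWhile (· == d)).length + 1) = t.drop (t.takeWhile (· == d)).length := by
        simp
      rw [hdrop]
      have : p + 1 + 1 + ((t.takeWhile (· == d)).length : Int)
          = p + 1 + (((t.takeWhile (· == d)).length + 1 : Nat) : Int) := by push_cast; ring
      rw [← this]
    · have htw : ((d :: t).takeWhile (· == c)).length = 0 := by
        simp [List.takeWhile_cons, hdc]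
      rw [htw]
      have hcd : ¬ c = d := fun h => hdc h.symm
      simp [lgpPairs, hcd]

theorem lgp_main_aux (n : Nat) : ∀ (l : List Char), l.length ≤ n → ∀ (p : Int),
    lgpLoopA l p = lgpOut (lgpBsFrom p l) := by
  induction n with
  | zero =>
    intro l hl p
    have : l = [] := List.eq_nil_of_length_eq_zero (Nat.le_zero.mp hl)
    subst this; simp [lgpLoopA, lgpBsFrom, lgpPairs, lgpOut]
  | succ m ihn =>
    intro l hl p
    match l with
    | [] => simp [lgpLoopA, lgpBsFrom, lgpPairs, lgpOut]
    | c :: rest =>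
      set k := (rest.takeWhile (· == c)).length with hk
      have hkle : k ≤ rest.length := (List.takeWhile_sublist _).length_le
      have hrlen : rest.length ≤ m := by simpa using hl
      rw [lgpLoopA]
      rw [show lgpBsFrom p (c :: rest) = p :: lgpPairs p (c :: rest) ++ [p + (c :: rest).length] from rfl]
      rw [lgpPairs_run rest p c, ← hk]
      by_cases hd : rest.drop k = []
      · -- single run reaches the end of the string: k = rest.length
        have hkeq : k = rest.length := by
          have := List.length_drop (l := rest) (i := k); rw [hd] at this; simp at this; omega
        rw [hd]
        simp only [lgpLoopA]
        have hlen : ((c :: rest).length : Int) = 1 + (k : Int) := by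
          simp [hkeq]; ring
        rw [hlen]
        have h1 : p + (1 + (k : Int)) = p + 1 + k := by ring
        rw [h1]
        by_cases h3 : p + 1 + (k : Int) - p ≥ 3
        · simp [lgpOut, lgpPairs, h3]
        · simp [lgpOut, lgpPairs, h3]
      · -- the run ends inside the string: recurse on the dropped suffix
        rw [if_neg hd]
        have ih := ihn (rest.drop k) (by simp [List.length_drop]; omega) (p + 1 + k)
        rw [ih]
        have hdl : ((rest.drop k).length : Int) = (rest.length : Int) - k := by
          simp [List.length_drop]; omega
        have hblen : p + ((c :: rest).length : Int) = p + 1 + (k : Int) + (rest.drop k).length := by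
          rw [hdl]; simp; omega
        rw [hblen]
        have hre : (p :: ([p + 1 + (k : Int)] ++ lgpPairs (p + 1 + k) (rest.drop k)) ++ [p + 1 + (k : Int) + ((rest.drop k).length : Int)])
              = p :: (p + 1 + (k : Int)) :: (lgpPairs (p + 1 + k) (rest.drop k) ++ [p + 1 + (k : Int) + ((rest.drop k).length : Int)]) := by simp
        rw [hre, lgpOut_cons]
        have hbs : lgpBsFrom (p + 1 + (k : Int)) (rest.drop k)
              = (p + 1 + (k : Int)) :: (lgpPairs (p + 1 + k) (rest.drop k) ++ [p + 1 + (k : Int) + ((rest.drop k).length : Int)]) := rfl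
        rw [hbs]
        by_cases h3 : p + 1 + (k : Int) - p ≥ 3
        · rw [if_pos h3, if_pos h3]; rfl
        · rw [if_neg h3, if_neg h3]; rfl

-- ===== VERDICT (by name: the statement is the Claim_ definition above) =====
theorem largeGroupPositions0_spec : Claim_equal_largeGroupPositions0 := by
  intro s _
  unfold Spec_largeGroupPositions0 largeGroupPositions0 largeGroupPositions0_alt
  have h := lgp_main_aux s.toList.length s.toList (Nat.le_refl _) 0
  simpa [lgpBsFrom] using h
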